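-- pv_equiv track=rewrite | github.com/ginkgobioworks/gen | examples/protein_engineering/translate_breakpoints.py | gapped_indices
-- ===== SOURCE A (Python) =====
-- def gapped_indices(seq):
--     ''' Converts a sequence with gaps to a list of indices, where gaps are represented as None '''
--     indices = []
--     counter = 1 # 1-based indexing
--     for char in seq:
--         if char == '-':
--             indices.append(None)
--         else:
--             indices.append(counter)
--             counter += 1
--     return indices
-- ===== SOURCE B (Python) =====
-- def gapped_indices(seq):
--     ''' Converts a sequence with gaps to a list of indices, where gaps are represented as None '''
--     cum = []
--     t = 0
--     for c in seq:
--         t += c != '-'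
--         cum.append(t)
--     return [None if c == '-' else k for c, k in zip(seq, cum)]
-- ===== Notes on version B (the rewrite author's own statement) =====
-- stated objective: alternative
-- what changed: B splits the task into two passes: first a prefix table of cumulative non-gap counts, then a zip pass masking gap positions with None, instead of one branching loop threading a counter.
import Mathlib
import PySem

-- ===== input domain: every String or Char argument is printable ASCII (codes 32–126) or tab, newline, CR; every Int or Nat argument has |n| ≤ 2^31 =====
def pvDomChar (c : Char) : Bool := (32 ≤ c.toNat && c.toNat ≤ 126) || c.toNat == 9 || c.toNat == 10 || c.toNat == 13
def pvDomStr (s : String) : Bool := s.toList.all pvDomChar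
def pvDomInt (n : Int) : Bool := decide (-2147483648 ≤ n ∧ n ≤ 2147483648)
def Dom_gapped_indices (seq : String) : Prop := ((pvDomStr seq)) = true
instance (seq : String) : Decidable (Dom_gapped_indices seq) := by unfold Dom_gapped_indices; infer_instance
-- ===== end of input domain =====

-- B builds a prefix table of cumulative non-gap counts, then masks gaps in a second zip pass; alternative decomposition, same cost.


-- ===== PORT A =====
-- one loop: append None on '-', else append the counter and bump it
def gapped_indices (seq : String) : List (Option Int) :=
  (seq.toList.foldl
    (fun (st : List (Option Int) × Int) c =>
      if c = '-' then (st.1 ++ [none], st.2) else (st.1 ++ [some st.2], st.2 + 1))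
    ([], 1)).1

-- ===== PORT B =====
-- pass 1: cumulative count of non-gap chars; pass 2: zip and mask gaps
def gapped_indices_alt (seq : String) : List (Option Int) :=
  let cum := (seq.toList.foldl
    (fun (st : List Int × Int) c =>
      let t := st.2 + (if c ≠ '-' then 1 else 0)
      (st.1 ++ [t], t))
    ([], 0)).1
  (seq.toList.zip cum).map (fun p => if p.1 = '-' then none else some p.2)

-- ===== PRECONDITION & SPEC =====
def Spec_gapped_indices (seq : String) (out : List (Option Int)) : Prop := out = gapped_indices_alt seq
instance (seq : String) (out : List (Option Int)) : Decidable (Spec_gapped_indices seq out) := by unfold Spec_gapped_indices; infer_instance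

-- ===== CLAIM (what is proved, stated in full; the proofs are below) =====
def Claim_equal_gapped_indices : Prop := ∀ (seq : String), Dom_gapped_indices seq → Spec_gapped_indices seq (gapped_indices seq)

-- ===== LEMMAS AND PROOFS =====

-- structural form of A's loop result
def goA : List Char → Int → List (Option Int)
  | [], _ => []
  | c :: r, k => if c = '-' then none :: goA r k else some k :: goA r (k + 1)

-- structural form of B's cum list
def goC : List Char → Int → List Int
  | [], _ => []
  | c :: r, t =>
    let t' := t + (if c ≠ '-' then 1 else 0)
    t' :: goC r t'

theorem foldA_eq (l : List Char) : ∀ (acc : List (Option Int)) (k : Int),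
    (l.foldl (fun (st : List (Option Int) × Int) c =>
      if c = '-' then (st.1 ++ [none], st.2) else (st.1 ++ [some st.2], st.2 + 1)) (acc, k)).1
      = acc ++ goA l k := by
  induction l with
  | nil => intro acc k; simp [goA]
  | cons c r ih =>
    intro acc k
    by_cases h : c = '-' <;> simp [goA, h, ih, List.append_assoc]

theorem foldC_eq (l : List Char) : ∀ (acc : List Int) (t : Int),
    (l.foldl (fun (st : List Int × Int) c =>
      let t' := st.2 + (if c ≠ '-' then 1 else 0)
      (st.1 ++ [t'], t')) (acc, t)).1
      = acc ++ goC l t := by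
  induction l with
  | nil => intro acc t; simp [goC]
  | cons c r ih =>
    intro acc t
    rw [List.foldl_cons, ih]
    simp [goC]

theorem zip_goC_eq (l : List Char) : ∀ (t : Int),
    (l.zip (goC l t)).map (fun p => if p.1 = '-' then none else some p.2) = goA l (t + 1) := by
  induction l with
  | nil => intro t; simp [goC, goA]
  | cons c r ih =>
    intro t
    by_cases h : c = '-'
    · simp [goC, goA, h, ih]
    · simp [goC, goA, h, ih]

-- ===== VERDICT (by name: the statement is the Claim_ definition above) =====
theorem gapped_indices_spec : Claim_equal_gapped_indices := by
  intro seq _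
  unfold Spec_gapped_indices gapped_indices gapped_indices_alt
  rw [foldA_eq, foldC_eq]
  simpa using (zip_goC_eq seq.toList 0).symm
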